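-- pv_equiv track=rewrite | github.com/matej-melansek/Advent_of_Code_2025 | day3.py | largest_value_in_intstr
-- ===== SOURCE A (Python) =====
-- def largest_value_in_intstr(intstr):
--     largest = 1
--     current_loc = 0
--     largest_loc = 0
--     for intager in intstr:
--         if int(intager) > largest:
--             largest = int(intager)
--             largest_loc = current_loc
--         current_loc += 1
--     if largest == 1:
--         largest_loc = intstr.rfind('1')
--     return largest, largest_loc
-- ===== SOURCE B (Python) =====
-- def largest_value_in_intstr(intstr):
--     digits = [int(c) for c in intstr]
--     largest = max((d for d in digits if d > 1), default=1)
--     if largest == 1: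
--         return 1, intstr.rfind('1')
--     return largest, digits.index(largest)
-- ===== Notes on version B (the rewrite author's own statement) =====
-- stated objective: simpler
-- what changed: A's single fused scan tracking a running max together with its first position is replaced by a compute-the-max pass over the digit list followed by a separate first-index lookup (list.index, or str.rfind in the all-digits-at-most-1 case).
import Mathlib
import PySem

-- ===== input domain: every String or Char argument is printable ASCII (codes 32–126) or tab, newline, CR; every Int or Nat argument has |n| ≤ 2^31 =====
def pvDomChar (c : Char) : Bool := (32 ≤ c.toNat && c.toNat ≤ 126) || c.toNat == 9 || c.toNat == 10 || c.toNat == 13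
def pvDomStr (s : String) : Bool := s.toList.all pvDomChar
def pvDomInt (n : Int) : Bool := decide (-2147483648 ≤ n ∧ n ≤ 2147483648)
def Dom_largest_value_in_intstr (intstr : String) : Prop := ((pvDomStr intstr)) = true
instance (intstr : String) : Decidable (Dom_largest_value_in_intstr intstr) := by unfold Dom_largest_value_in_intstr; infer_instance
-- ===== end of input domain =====

-- B replaces A's single fused scan (running max + its first position) with a compute-the-max
-- pass over the digit list followed by a separate first-index (or rfind) lookup: simpler.

-- ===== PORT A =====
-- int(c) for a single character c; exact (via PySem.Int.ofChars?) whenever c is a digit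
-- (Pre_ admits only digit strings; on a non-digit Python raises ValueError and the .getD 0 is never compared).
def pvIntChar (c : Char) : Int := (PySem.Int.ofChars? [c]).getD 0

-- the 'for intager in intstr' loop, state (largest, current_loc, largest_loc)
def pvLoopA : List Char → Int × Int × Int → Int × Int × Int
  | [], s => s
  | c :: t, (largest, cur, loc) =>
      if pvIntChar c > largest then pvLoopA t (pvIntChar c, cur + 1, cur)
      else pvLoopA t (largest, cur + 1, loc)

def largest_value_in_intstr (intstr : String) : Int × Int :=
  let s := pvLoopA intstr.toList (1, 0, 0)
  if s.1 = 1 then (s.1, PySem.Str.rfind intstr "1")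
  else (s.1, s.2.2)

-- ===== PORT B =====
def largest_value_in_intstr_alt (intstr : String) : Int × Int :=
  let digits := intstr.toList.map pvIntChar
  -- max((d for d in digits if d > 1), default=1): all kept elements exceed the default
  let largest := (digits.filter (fun d => decide (d > 1))).foldl max 1
  if largest = 1 then (1, PySem.Str.rfind intstr "1")
  else (largest, ((PySem.List.index? digits largest).getD 0 : Nat))  -- .getD unreachable: largest ∈ digits here

-- ===== PRECONDITION & SPEC =====
-- Pre_: every character is a decimal digit; on any other character Python A raises ValueError at int(c).
def Pre_largest_value_in_intstr (intstr : String) : Prop :=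
  intstr.toList.all PySem.Chars.isdigit = true
instance (intstr : String) : Decidable (Pre_largest_value_in_intstr intstr) := by unfold Pre_largest_value_in_intstr; infer_instance

def pvWitness_largest_value_in_intstr : String := "0119"

def Spec_largest_value_in_intstr (intstr : String) (out : Int × Int) : Prop := out = largest_value_in_intstr_alt intstr
instance (intstr : String) (out : Int × Int) : Decidable (Spec_largest_value_in_intstr intstr out) := by unfold Spec_largest_value_in_intstr; infer_instance

-- ===== CLAIM (what is proved, stated in full; the proofs are below) =====
def Claim_equal_largest_value_in_intstr : Prop := ∀ (intstr : String), Dom_largest_value_in_intstr intstr → Pre_largest_value_in_intstr intstr → Spec_largest_value_in_intstr intstr (largest_value_in_intstr intstr)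

-- ===== LEMMAS AND PROOFS =====

-- running max never decreases
lemma pv_le_foldl_max (l : List Int) (m : Int) : m ≤ l.foldl max m := by
  induction l generalizing m with
  | nil => simp
  | cons c t ih => exact le_trans (le_max_left m c) (ih (max m c))

-- the final max is the start value or a list element
lemma pv_foldl_max_mem (l : List Int) (m : Int) : l.foldl max m = m ∨ l.foldl max m ∈ l := by
  induction l generalizing m with
  | nil => simp
  | cons c t ih =>
    simp only [List.foldl_cons]
    rcases ih (max m c) with h | h
    · rw [h]
      rcases max_cases m c with ⟨he, _⟩ | ⟨he, _⟩
      · exact Or.inl he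
      · exact Or.inr (by simp [he])
    · exact Or.inr (List.mem_cons_of_mem _ h)

-- elements ≤ 1 never affect a running max started at 1 (or above)
lemma pv_foldl_max_filter (l : List Int) (m : Int) (hm : 1 ≤ m) :
    (l.filter (fun d => decide (d > 1))).foldl max m = l.foldl max m := by
  induction l generalizing m with
  | nil => simp
  | cons c t ih =>
    by_cases h : c > 1
    · simpa [List.filter, h] using ih (max m c) (le_trans hm (le_max_left m c))
    · have : max m c = m := max_eq_left (le_trans (by omega) hm)
      simp [List.filter, h, this, ih m hm]

-- characterisation of A's loop: final max, final counter, and (when an update happened)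
-- the position of the FIRST occurrence of the final max
lemma pvLoopA_spec (l : List Char) (m cur loc : Int) :
    pvLoopA l (m, cur, loc) =
      ((l.map pvIntChar).foldl max m, cur + l.length,
       if (l.map pvIntChar).foldl max m = m then loc
       else cur + ((l.map pvIntChar).findIdx (fun d => d == (l.map pvIntChar).foldl max m) : Int)) := by
  induction l generalizing m cur loc with
  | nil => simp [pvLoopA]
  | cons c t ih =>
    by_cases h : pvIntChar c > m
    · rw [pvLoopA, if_pos h, ih]
      have hmax : max m (pvIntChar c) = pvIntChar c := max_eq_right (le_of_lt h)
      simp only [List.map_cons, List.foldl_cons, hmax, List.length_cons]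
      have hM : pvIntChar c ≤ (t.map pvIntChar).foldl max (pvIntChar c) := pv_le_foldl_max _ _
      have hne : (t.map pvIntChar).foldl max (pvIntChar c) ≠ m := by omega
      rw [if_neg hne]
      by_cases he : (t.map pvIntChar).foldl max (pvIntChar c) = pvIntChar c
      · rw [if_pos he, he, List.findIdx_cons]
        simp only [beq_self_eq_true, cond_true]
        refine Prod.ext rfl (Prod.ext ?_ ?_) <;> push_cast <;> ring
      · have hc : (pvIntChar c == (t.map pvIntChar).foldl max (pvIntChar c)) = false := by
          simp only [beq_eq_false_iff_ne]; exact fun hh => he hh.symm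
        rw [if_neg he, List.findIdx_cons, hc]
        simp only [cond_false]
        refine Prod.ext rfl (Prod.ext ?_ ?_) <;> push_cast <;> ring
    · rw [pvLoopA, if_neg h, ih]
      have hmax : max m (pvIntChar c) = m := max_eq_left (by omega)
      simp only [List.map_cons, List.foldl_cons, hmax, List.length_cons]
      by_cases he : (t.map pvIntChar).foldl max m = m
      · rw [if_pos he, if_pos he]
        refine Prod.ext rfl (Prod.ext ?_ rfl)
        push_cast; ring
      · rw [if_neg he, if_neg he]
        have hgt : m < (t.map pvIntChar).foldl max m :=
          lt_of_le_of_ne (pv_le_foldl_max _ _) (Ne.symm he)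
        have hc : (pvIntChar c == (t.map pvIntChar).foldl max m) = false := by
          simp only [beq_eq_false_iff_ne]; omega
        rw [List.findIdx_cons, hc]
        simp only [cond_false]
        refine Prod.ext rfl (Prod.ext ?_ ?_) <;> push_cast <;> ring

lemma pv_main (intstr : String) :
    largest_value_in_intstr intstr = largest_value_in_intstr_alt intstr := by
  unfold largest_value_in_intstr largest_value_in_intstr_alt
  have hfil : ((intstr.toList.map pvIntChar).filter (fun d => decide (d > 1))).foldl max 1 =
      (intstr.toList.map pvIntChar).foldl max 1 :=
    pv_foldl_max_filter _ _ le_rfl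
  simp only [pvLoopA_spec, hfil]
  by_cases h1 : (intstr.toList.map pvIntChar).foldl max 1 = 1
  · simp [h1]
  · have hmem : (intstr.toList.map pvIntChar).foldl max 1 ∈ intstr.toList.map pvIntChar :=
      (pv_foldl_max_mem _ 1).resolve_left h1
    have hidx : List.idxOf? ((intstr.toList.map pvIntChar).foldl max 1) (intstr.toList.map pvIntChar)
        = some (List.findIdx (fun d => d == (intstr.toList.map pvIntChar).foldl max 1) (intstr.toList.map pvIntChar)) := by
      rw [show List.idxOf? ((intstr.toList.map pvIntChar).foldl max 1) (intstr.toList.map pvIntChar)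
            = List.findIdx? (fun d => d == (intstr.toList.map pvIntChar).foldl max 1) (intstr.toList.map pvIntChar) from rfl,
          List.findIdx?_eq_some_iff_findIdx_eq]
      exact ⟨List.findIdx_lt_length_of_exists ⟨_, hmem, by simp⟩, rfl⟩
    simp [h1, hidx]

-- ===== VERDICT (by name: the statement is the Claim_ definition above) =====
theorem largest_value_in_intstr_spec : Claim_equal_largest_value_in_intstr := by
  intro intstr _ _
  unfold Spec_largest_value_in_intstr
  exact pv_main intstr
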